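-- pv_equiv track=rewrite | github.com/mubtakir/nlp_bayan | web_ide/app.py | _extract_first_heading
-- ===== SOURCE A (Python) =====
-- def _extract_first_heading(text: str) -> str | None:
--     try:
--         for line in text.splitlines():
--             s = line.lstrip()
--             if s.startswith('#'):
--                 # strip leading hashes and spaces
--                 s2 = s.lstrip('#').strip()
--                 if s2:
--                     return s2
--         return None
--     except Exception:
--         return None
-- ===== SOURCE B (Python) =====
-- def _extract_first_heading(text: str) -> str | None:
--     # Single index-based scan over the text; no splitlines and no per-line
--     # intermediate strings except for the returned heading itself.
--     n = len(text)
--     i = 0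
--     while i < n:
--         # skip leading spaces/tabs of the current line
--         while i < n and text[i] in ' \t':
--             i += 1
--         if i < n and text[i] == '#':
--             # consume the run of hashes
--             while i < n and text[i] == '#':
--                 i += 1
--             # take the rest of the line
--             j = i
--             while j < n and text[j] != '\n' and text[j] != '\r':
--                 j += 1
--             s2 = text[i:j].strip()
--             if s2:
--                 return s2
--             i = j
--         else:
--             # skip to the end of the line
--             while i < n and text[i] != '\n' and text[i] != '\r':
--                 i += 1
--         # skip the line terminator ('\r\n' counts as one)
--         if i < n:
--             if text[i] == '\r' and i + 1 < n and text[i + 1] == '\n':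
--                 i += 2
--             else:
--                 i += 1
--     return None
-- ===== Notes on version B (the rewrite author's own statement) =====
-- stated objective: alternative
-- what changed: B drops splitlines and the per-line lstrip/strip loop and instead walks the text once with a cursor: it skips leading spaces/tabs, tests for a hash, slices the heading out up to the line break, and steps over the CRLF/CR/LF terminator itself.
import Mathlib
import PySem

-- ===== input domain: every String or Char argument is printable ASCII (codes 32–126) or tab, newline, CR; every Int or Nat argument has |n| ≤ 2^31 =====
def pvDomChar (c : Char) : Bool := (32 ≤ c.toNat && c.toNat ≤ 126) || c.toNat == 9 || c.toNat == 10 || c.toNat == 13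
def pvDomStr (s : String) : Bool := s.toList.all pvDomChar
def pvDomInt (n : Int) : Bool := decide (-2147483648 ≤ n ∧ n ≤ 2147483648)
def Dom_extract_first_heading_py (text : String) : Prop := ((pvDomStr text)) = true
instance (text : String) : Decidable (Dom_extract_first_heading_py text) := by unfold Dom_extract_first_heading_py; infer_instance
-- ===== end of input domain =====

-- B replaces the splitlines + per-line lstrip loop by a single scan over the
-- characters of the text (objective: alternative decomposition, one pass, no line list).


-- ===== PORT A =====
-- the loop 'for line in text.splitlines(): …' of A
def aGo : List (List Char) → Option String
  | [] => none
  | line :: rest =>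
    let s := PySem.Chars.lstrip line
    if PySem.Chars.startswith s ['#'] then
      -- s.lstrip('#') ported by hand as dropWhile (· == '#') (exact: one-char strip set)
      let s2 := PySem.Chars.strip (List.dropWhile (· == '#') s)
      if s2.isEmpty then aGo rest else some (String.ofList s2)
    else aGo rest

-- A's try/except can never fire (nothing inside raises), so it is not ported.
def extract_first_heading_py (text : String) : Option String :=
  aGo (PySem.Chars.splitlines text.toList)

-- ===== PORT B =====
-- text[i] in ' \t'
def bIsWT (c : Char) : Bool := c == ' ' || c == '\t'
-- text[j] != '\n' and text[j] != '\r'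
def bNotBrk (c : Char) : Bool := !(c == '\n' || c == '\r')
-- the terminator skip at the bottom of Source B's loop ('\r\n' counts as one)
def bSkipTerm : List Char → List Char
  | '\r' :: '\n' :: rest => rest
  | _ :: rest => rest
  | [] => []

theorem bSkipTerm_length_le (l : List Char) : (bSkipTerm l).length ≤ l.length := by
  match l with
  | [] => simp [bSkipTerm]
  | '\r' :: '\n' :: rest => simp [bSkipTerm]; omega
  | c :: rest =>
    rw [bSkipTerm.eq_def]
    split <;> simp_all <;> omega

theorem bStep_lt (cs l : List Char) (h : cs ≠ []) (hle : l.length ≤ cs.length) :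
    (bSkipTerm (List.dropWhile bNotBrk l)).length < cs.length := by
  have h1 : (List.dropWhile bNotBrk l).length ≤ l.length := List.length_dropWhile_le _ _
  have h2 := bSkipTerm_length_le (List.dropWhile bNotBrk l)
  match hd : List.dropWhile bNotBrk l with
  | [] => simp [bSkipTerm]; cases cs <;> simp_all
  | '\r' :: '\n' :: rest => rw [hd] at h1 h2; simp [bSkipTerm] at *; omega
  | c :: rest =>
    rw [hd] at h1 h2
    have : (bSkipTerm (c :: rest)).length < (c :: rest).length := by
      rw [bSkipTerm.eq_def]; split <;> simp_all
    omega

-- the outer 'while i < n' loop of Source B, acting on the remaining suffix of the text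
def altGo (cs : List Char) : Option String :=
  if hcs : cs = [] then none
  else
    -- skip leading spaces/tabs of the current line
    let s := List.dropWhile bIsWT cs
    have hs : s.length ≤ cs.length := List.length_dropWhile_le _ _
    -- 'if i < n and text[i] == '#''
    if s.head? = some '#' then
      -- consume the run of hashes
      let s2 := List.dropWhile (· == '#') s
      have hs2 : s2.length ≤ s.length := List.length_dropWhile_le _ _
      -- rest of the line, then strip
      let core := PySem.Chars.strip (List.takeWhile bNotBrk s2)
      if core = [] then altGo (bSkipTerm (List.dropWhile bNotBrk s2))
      else some (String.ofList core)
    else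
      -- skip to the end of the line
      altGo (bSkipTerm (List.dropWhile bNotBrk s))
  termination_by cs.length
  decreasing_by
  · exact bStep_lt cs s2 hcs (le_trans hs2 hs)
  · exact bStep_lt cs s hcs hs

def extract_first_heading_py_alt (text : String) : Option String :=
  altGo text.toList

-- ===== PRECONDITION & SPEC =====
def Spec_extract_first_heading_py (text : String) (out : Option String) : Prop := out = extract_first_heading_py_alt text
instance (text : String) (out : Option String) : Decidable (Spec_extract_first_heading_py text out) := by unfold Spec_extract_first_heading_py; infer_instance

-- ===== CLAIM (what is proved, stated in full; the proofs are below) =====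
def Claim_equal_extract_first_heading_py : Prop := ∀ (text : String), Dom_extract_first_heading_py text → Spec_extract_first_heading_py text (extract_first_heading_py text)

-- ===== LEMMAS AND PROOFS =====

-- the line-break test splitlines uses internally
def pyIsB (c : Char) : Bool :=
  have n := c.toNat
  decide (n = 10) || decide (n = 13) || decide (n = 11) || decide (n = 12) || decide (n = 28) || decide (n = 29) ||
    decide (n = 30) || decide (n = 133) || decide (n = 8232) || decide (n = 8233)

theorem splitlines_eq (cs : List Char) :
    PySem.Chars.splitlines cs = PySem.Chars.splitlines.go pyIsB cs [] [] := rfl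

theorem go_nil (isB : Char → Bool) (cur : List Char) (acc : List (List Char)) :
    PySem.Chars.splitlines.go isB [] cur acc =
      if cur.isEmpty then acc.reverse else (cur.reverse :: acc).reverse := by
  simp [PySem.Chars.splitlines.go]

theorem go_crlf (isB : Char → Bool) (rest : List Char) (cur : List Char) (acc : List (List Char)) :
    PySem.Chars.splitlines.go isB ('\r' :: '\n' :: rest) cur acc =
      PySem.Chars.splitlines.go isB rest [] (cur.reverse :: acc) := by
  simp [PySem.Chars.splitlines.go]

theorem go_cons (isB : Char → Bool) (c : Char) (rest : List Char) (cur : List Char) (acc : List (List Char))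
    (h : ¬(c = '\r' ∧ ∃ r, rest = '\n' :: r)) :
    PySem.Chars.splitlines.go isB (c :: rest) cur acc =
      if isB c then PySem.Chars.splitlines.go isB rest [] (cur.reverse :: acc)
      else PySem.Chars.splitlines.go isB rest (c :: cur) acc := by
  rw [PySem.Chars.splitlines.go.eq_def]
  split
  · exfalso; rename_i heq; simp at heq
  · exfalso; rename_i heq; injection heq with h1 h2; exact h ⟨h1, _, h2⟩
  · rename_i heq; injection heq with h1 h2; subst h1; subst h2; rfl

theorem go_acc (isB : Char → Bool) (cs : List Char) (cur : List Char) (acc : List (List Char)) :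
    PySem.Chars.splitlines.go isB cs cur acc = acc.reverse ++ PySem.Chars.splitlines.go isB cs cur [] := by
  match cs with
  | [] => rw [go_nil, go_nil]; split <;> simp
  | '\r' :: '\n' :: rest =>
    rw [go_crlf, go_crlf, go_acc isB rest [] (cur.reverse :: acc), go_acc isB rest [] [cur.reverse]]
    simp
  | c :: rest =>
    by_cases h : c = '\r' ∧ ∃ r, rest = '\n' :: r
    · obtain ⟨rfl, r, rfl⟩ := h
      rw [go_crlf, go_crlf, go_acc isB r [] (cur.reverse :: acc), go_acc isB r [] [cur.reverse]]
      simp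
    · rw [go_cons isB c rest cur acc h, go_cons isB c rest cur [] h]
      split
      · rw [go_acc isB rest [] (cur.reverse :: acc), go_acc isB rest [] [cur.reverse]]
        simp
      · rw [go_acc isB rest (c :: cur) acc]
  termination_by cs.length

theorem go_step (isB : Char → Bool) (cs : List Char) (cur : List Char) (acc : List (List Char))
    (hb : ∀ c ∈ cs, isB c = !bNotBrk c) (hne : ¬(cs = [] ∧ cur = [])) :
    PySem.Chars.splitlines.go isB cs cur acc =
      acc.reverse ++ ((cur.reverse ++ List.takeWhile bNotBrk cs) ::
        PySem.Chars.splitlines.go isB (bSkipTerm (List.dropWhile bNotBrk cs)) [] []) := by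
  match cs with
  | [] =>
    have hcur : cur ≠ [] := by intro h; exact hne ⟨rfl, h⟩
    have hsk : bSkipTerm (List.dropWhile bNotBrk ([] : List Char)) = [] := rfl
    rw [go_nil, hsk, go_nil]
    simp [hcur, List.isEmpty_iff]
  | '\r' :: '\n' :: rest =>
    rw [go_crlf, go_acc isB rest [] (cur.reverse :: acc)]
    have h1 : bNotBrk '\r' = false := by decide
    simp [h1, bSkipTerm]
  | c :: rest =>
    by_cases h : c = '\r' ∧ ∃ r, rest = '\n' :: r
    · obtain ⟨rfl, r, rfl⟩ := h
      rw [go_crlf, go_acc isB r [] (cur.reverse :: acc)]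
      have h1 : bNotBrk '\r' = false := by decide
      simp [h1, bSkipTerm]
    · rw [go_cons isB c rest cur acc h]
      have hbc : isB c = !bNotBrk c := hb c (List.mem_cons_self ..)
      by_cases hB : bNotBrk c = true
      · rw [if_neg (by simp [hbc, hB])]
        rw [go_step isB rest (c :: cur) acc (fun x hx => hb x (List.mem_cons_of_mem _ hx)) (by simp)]
        simp [hB]
      · rw [if_pos (by simp [hbc]; simpa using hB)]
        rw [go_acc isB rest [] (cur.reverse :: acc)]
        have hd : List.dropWhile bNotBrk (c :: rest) = c :: rest := by
          simp [List.dropWhile_cons, hB]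
        have hsk : bSkipTerm (c :: rest) = rest := by
          rw [bSkipTerm.eq_def]
          split
          · rename_i heq; exfalso; injection heq with h1 h2; exact h ⟨h1, _, h2⟩
          · rename_i heq; injection heq with h1 h2; rw [h2]
          · rename_i heq; simp at heq
        simp [List.takeWhile_cons, hB, hd, hsk]
  termination_by cs.length

theorem char_toNat_inj (a b : Char) : a.toNat = b.toNat ↔ a = b :=
  ⟨fun h => Char.ext (UInt32.toNat_inj.mp h), fun h => h ▸ rfl⟩

theorem isB_dom (c : Char) (h : pvDomChar c = true) : pyIsB c = !bNotBrk c := by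
  simp only [pvDomChar, Bool.or_eq_true, Bool.and_eq_true, decide_eq_true_eq, beq_iff_eq] at h
  have h10 : ('\n' : Char).toNat = 10 := rfl
  have h13 : ('\r' : Char).toNat = 13 := rfl
  simp only [pyIsB, bNotBrk, Bool.not_not]
  rw [Bool.eq_iff_iff]
  simp only [Bool.or_eq_true, decide_eq_true_eq, beq_iff_eq, ← char_toNat_inj, h10, h13]
  omega

theorem isspace_dom (c : Char) (h : pvDomChar c = true) (hnb : bNotBrk c = true) :
    PySem.Chars.isspace c = bIsWT c := by
  simp only [pvDomChar, Bool.or_eq_true, Bool.and_eq_true, decide_eq_true_eq, beq_iff_eq] at h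
  have h10 : ('\n' : Char).toNat = 10 := rfl
  have h13 : ('\r' : Char).toNat = 13 := rfl
  have h32 : (' ' : Char).toNat = 32 := rfl
  have h9 : ('\t' : Char).toNat = 9 := rfl
  simp only [bNotBrk, Bool.not_eq_eq_eq_not, Bool.not_true, Bool.or_eq_false_iff,
    beq_eq_false_iff_ne, ne_eq, ← char_toNat_inj, h10, h13] at hnb
  rw [Bool.eq_iff_iff]
  simp only [PySem.Chars.isspace, bIsWT, Bool.or_eq_true, Bool.and_eq_true, decide_eq_true_eq,
    beq_iff_eq, ← char_toNat_inj, h10, h13, h32, h9]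
  omega

theorem dropWhile_congr_mem {α : Type} (p q : α → Bool) (l : List α) (h : ∀ c ∈ l, p c = q c) :
    List.dropWhile p l = List.dropWhile q l := by
  induction l with
  | nil => rfl
  | cons c t ih =>
    have hc := h c (List.mem_cons_self ..)
    simp only [List.dropWhile_cons, hc]
    split
    · exact ih fun x hx => h x (List.mem_cons_of_mem _ hx)
    · rfl

theorem dropWhile_dropWhile {α : Type} (p q : α → Bool) (l : List α) (h : ∀ c, q c = true → p c = true) :
    List.dropWhile p (List.dropWhile q l) = List.dropWhile p l := by
  induction l with
  | nil => rfl
  | cons c t ih =>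
    by_cases hq : q c = true
    · simp [List.dropWhile_cons, hq, h c hq, ih]
    · simp [List.dropWhile_cons, hq]

theorem dropWhile_takeWhile {α : Type} (p q : α → Bool) (l : List α) (h : ∀ c, q c = true → p c = true) :
    List.dropWhile q (List.takeWhile p l) = List.takeWhile p (List.dropWhile q l) := by
  induction l with
  | nil => rfl
  | cons c t ih =>
    by_cases hq : q c = true
    · simp [List.takeWhile_cons, List.dropWhile_cons, hq, h c hq, ih]
    · by_cases hp : p c = true <;> simp [List.takeWhile_cons, List.dropWhile_cons, hq, hp]

theorem wt_notbrk : ∀ c : Char, bIsWT c = true → bNotBrk c = true := by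
  intro c hc
  simp only [bIsWT, Bool.or_eq_true, beq_iff_eq] at hc
  rcases hc with rfl | rfl <;> decide

theorem hash_notbrk : ∀ c : Char, (c == '#') = true → bNotBrk c = true := by
  intro c hc
  simp only [beq_iff_eq] at hc
  subst hc; decide

theorem lstrip_line (cs : List Char) (hdom : ∀ c ∈ cs, pvDomChar c = true) :
    PySem.Chars.lstrip (List.takeWhile bNotBrk cs) =
      List.takeWhile bNotBrk (List.dropWhile bIsWT cs) := by
  unfold PySem.Chars.lstrip
  rw [dropWhile_congr_mem PySem.Chars.isspace bIsWT _ (fun c hc => by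
    have hmem : c ∈ cs := (List.takeWhile_sublist _).subset hc
    exact isspace_dom c (hdom c hmem) (List.mem_takeWhile_imp hc))]
  exact dropWhile_takeWhile bNotBrk bIsWT cs wt_notbrk

theorem splitlines_step (cs : List Char) (hne : cs ≠ []) (hdom : ∀ c ∈ cs, pvDomChar c = true) :
    PySem.Chars.splitlines cs =
      List.takeWhile bNotBrk cs ::
        PySem.Chars.splitlines (bSkipTerm (List.dropWhile bNotBrk cs)) := by
  rw [splitlines_eq, splitlines_eq]
  rw [go_step pyIsB cs [] [] (fun c hc => isB_dom c (hdom c hc)) (by simp [hne])]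
  simp

theorem bSkipTerm_subset (l : List Char) : ∀ c ∈ bSkipTerm l, c ∈ l := by
  intro c hc
  match l with
  | [] => simpa [bSkipTerm] using hc
  | '\r' :: '\n' :: rest => simp [bSkipTerm] at hc; simp [hc]
  | x :: rest =>
    rw [bSkipTerm.eq_def] at hc
    split at hc <;> simp_all

theorem main_lemma (cs : List Char) (hdom : ∀ c ∈ cs, pvDomChar c = true) :
    aGo (PySem.Chars.splitlines cs) = altGo cs := by
  by_cases hcs : cs = []
  · subst hcs
    rw [splitlines_eq, go_nil, altGo]
    simp [aGo]
  · have hdom' : ∀ c ∈ bSkipTerm (List.dropWhile bNotBrk cs), pvDomChar c = true :=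
      fun c hc => hdom c ((List.dropWhile_sublist _).subset (bSkipTerm_subset _ c hc))
    have IH : aGo (PySem.Chars.splitlines (bSkipTerm (List.dropWhile bNotBrk cs))) =
        altGo (bSkipTerm (List.dropWhile bNotBrk cs)) := main_lemma _ hdom'
    have hdd : List.dropWhile bNotBrk (List.dropWhile bIsWT cs) = List.dropWhile bNotBrk cs :=
      dropWhile_dropWhile bNotBrk bIsWT cs wt_notbrk
    have hdd2 : List.dropWhile bNotBrk (List.dropWhile (· == '#') (List.dropWhile bIsWT cs)) =
        List.dropWhile bNotBrk cs := by
      rw [dropWhile_dropWhile bNotBrk (· == '#') _ hash_notbrk, hdd]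
    have hdt : List.dropWhile (· == '#') (List.takeWhile bNotBrk (List.dropWhile bIsWT cs)) =
        List.takeWhile bNotBrk (List.dropWhile (· == '#') (List.dropWhile bIsWT cs)) :=
      dropWhile_takeWhile bNotBrk (· == '#') _ hash_notbrk
    rw [splitlines_step cs hcs hdom]
    rw [altGo, dif_neg hcs]
    simp only [aGo]
    rw [lstrip_line cs hdom, hdt, hdd2, hdd]
    rcases hw : List.dropWhile bIsWT cs with _ | ⟨c, tl⟩
    · rw [hw] at hdd
      have hnil : List.dropWhile bNotBrk cs = [] := by rw [← hdd]; rfl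
      rw [hnil] at IH ⊢
      have hsw : PySem.Chars.startswith (List.takeWhile bNotBrk ([] : List Char)) ['#'] = false := rfl
      rw [hsw]
      simp only [Bool.false_eq_true, if_false, List.head?_nil]
      rw [if_neg (by simp)]
      exact IH
    · by_cases hc : c = '#'
      · subst hc
        have hsw : PySem.Chars.startswith (List.takeWhile bNotBrk ('#' :: tl)) ['#'] = true := by
          rw [List.takeWhile_cons, if_pos (by decide)]
          simp [PySem.Chars.startswith, List.isPrefixOf]
        rw [hsw, if_pos rfl]
        simp only [if_true, List.head?_cons]
        simp only [List.isEmpty_iff]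
        split_ifs with h
        · exact IH
        · rfl
      · have hsw : PySem.Chars.startswith (List.takeWhile bNotBrk (c :: tl)) ['#'] = false := by
          rw [List.takeWhile_cons]
          split
          · simp [PySem.Chars.startswith, List.isPrefixOf, hc]
            intro h; exact absurd h.symm hc
          · rfl
        rw [hsw]
        simp only [Bool.false_eq_true, if_false, List.head?_cons]
        rw [if_neg (by simp [hc])]
        exact IH
  termination_by cs.length
  decreasing_by exact bStep_lt cs cs hcs le_rfl

-- ===== VERDICT (by name: the statement is the Claim_ definition above) =====
theorem extract_first_heading_py_spec : Claim_equal_extract_first_heading_py := by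
  intro text hdom
  unfold Spec_extract_first_heading_py extract_first_heading_py extract_first_heading_py_alt
  exact main_lemma text.toList (by simpa [pvDomStr, List.all_eq_true, Dom_extract_first_heading_py] using hdom)
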